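-- pv_equiv track=rewrite | github.com/Sayantan-coder/Edabith-Hard-level | making_a_box.py | make_a_box
-- ===== SOURCE A (Python) =====
-- def make_a_box(num: int) -> list:
--     box_list = []
--     for row in range(num):
--         element = ""
--         for column in range(num):
--             if row == 0 or row == num - 1 or column == 0 or column == num - 1:
--                 element = element + "#"
--             else:
--                 element += " "
--         box_list.append(element)
--     return box_list
-- ===== SOURCE B (Python) =====
-- def make_a_box(num: int) -> list:
--     if num <= 0:
--         return []
--     border = "#" * num
--     if num == 1:
--         return [border]
--     middle = "#" + " " * (num - 2) + "#"
--     return [border] + [middle] * (num - 2) + [border]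
-- ===== Notes on version B (the rewrite author's own statement) =====
-- stated objective: simpler
-- what changed: Replaced the per-cell nested loops by row classification: build the border and middle strings once with bulk string repetition and assemble [border] + [middle]*(num-2) + [border], eliminating the inner column loop and per-character concatenation.
import Mathlib
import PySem

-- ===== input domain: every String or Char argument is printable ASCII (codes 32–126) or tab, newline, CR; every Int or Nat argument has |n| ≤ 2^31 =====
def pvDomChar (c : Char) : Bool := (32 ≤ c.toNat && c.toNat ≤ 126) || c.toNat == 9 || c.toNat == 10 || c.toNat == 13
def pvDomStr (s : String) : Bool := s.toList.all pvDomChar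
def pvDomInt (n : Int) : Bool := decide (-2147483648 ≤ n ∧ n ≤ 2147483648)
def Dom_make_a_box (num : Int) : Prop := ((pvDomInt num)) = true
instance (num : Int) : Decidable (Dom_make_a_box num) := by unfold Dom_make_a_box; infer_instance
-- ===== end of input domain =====

-- B drops the inner per-cell loop: it classifies rows, builds border/middle once and assembles the list (objective: simpler).

-- ===== PORT A =====
def make_a_box (num : Int) : List String :=
  (PySem.List.pyRange 0 num 1).foldl
    (fun box_list row =>
      box_list ++ [(PySem.List.pyRange 0 num 1).foldl
        (fun element column =>
          if row = 0 ∨ row = num - 1 ∨ column = 0 ∨ column = num - 1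
          then element ++ "#" else element ++ " ") ""]) []

-- ===== PORT B =====
def make_a_box_alt (num : Int) : List String :=
  if num ≤ 0 then []
  else
    let border : String := String.ofList (List.replicate num.toNat '#')
    if num = 1 then [border]
    else
      let middle : String := "#" ++ String.ofList (List.replicate (num - 2).toNat ' ') ++ "#"
      [border] ++ List.replicate (num - 2).toNat middle ++ [border]

-- ===== PRECONDITION & SPEC =====
def Spec_make_a_box (num : Int) (out : List String) : Prop := out = make_a_box_alt num
instance (num : Int) (out : List String) : Decidable (Spec_make_a_box num out) := by unfold Spec_make_a_box; infer_instance

-- ===== CLAIM (what is proved, stated in full; the proofs are below) =====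
def Claim_equal_make_a_box : Prop := ∀ (num : Int), Dom_make_a_box num → Spec_make_a_box num (make_a_box num)

-- ===== LEMMAS AND PROOFS =====

-- the outer loop appends one element per row: it is a map
theorem pv_foldl_snoc {α β : Type} (f : α → β) :
    ∀ (l : List α) (init : List β),
      l.foldl (fun acc x => acc ++ [f x]) init = init ++ l.map f := by
  intro l
  induction l with
  | nil => simp
  | cons x xs ih => intro init; simp [List.foldl_cons, ih]

-- the inner loop appends one character per column: it is a String.ofList of a map
theorem pv_foldl_char (P : Int → Prop) [DecidablePred P] :
    ∀ (l : List Int) (s : String),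
      l.foldl (fun el col => if P col then el ++ "#" else el ++ " ") s
        = s ++ String.ofList (l.map (fun col => if P col then '#' else ' ')) := by
  intro l
  induction l with
  | nil => intro s; apply String.ext; simp
  | cons x xs ih =>
    intro s
    by_cases h : P x <;>
      simp [List.foldl_cons, h, ih] <;> apply String.ext <;> simp

theorem make_a_box_eq_map (num : Int) :
    make_a_box num
      = (PySem.List.pyRange 0 num 1).map (fun row =>
          String.ofList ((PySem.List.pyRange 0 num 1).map
            (fun col => if row = 0 ∨ row = num - 1 ∨ col = 0 ∨ col = num - 1
                        then '#' else ' '))) := by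
  unfold make_a_box
  rw [pv_foldl_snoc]
  simp only [List.nil_append]
  apply List.map_congr_left
  intro row _
  exact pv_foldl_char (fun col => row = 0 ∨ row = num - 1 ∨ col = 0 ∨ col = num - 1) _ ""

-- ===== VERDICT (by name: the statement is the Claim_ definition above) =====
theorem make_a_box_spec : Claim_equal_make_a_box := by
  intro num _
  show make_a_box num = make_a_box_alt num
  rw [make_a_box_eq_map]
  unfold make_a_box_alt
  rw [PySem.List.pyRange_one]
  simp only [Int.sub_zero, Int.zero_add]
  by_cases h0 : num ≤ 0
  · have : num.toNat = 0 := by omega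
    simp [h0, this]
  · by_cases h1 : num = 1
    · subst h1; decide
    · -- num ≥ 2
      have h2 : 2 ≤ num := by omega
      simp only [h0, h1, if_false]
      set n := num.toNat with hn
      have hnum : (n : Int) = num := by omega
      have hlen : 1 + ((n - 2) + 1) = n := by omega
      apply List.ext_getElem
      · simp; omega
      · intro i hi1 hi2
        simp only [List.getElem_map, List.getElem_range] at *
        have hin : i < n := by simpa using hi1
        -- right-hand side element
        rcases Nat.lt_or_ge 0 i with hpos | hz
        · rcases Nat.lt_or_ge i (n - 1) with hmid | hlast
          · -- middle row
            have hrhs : ([String.ofList (List.replicate n '#')] ++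
                List.replicate (num - 2).toNat
                  ("#" ++ String.ofList (List.replicate (num - 2).toNat ' ') ++ "#") ++
                [String.ofList (List.replicate n '#')])[i]'(by simp; omega)
                = "#" ++ String.ofList (List.replicate (num - 2).toNat ' ') ++ "#" := by
              rw [List.getElem_append_left (by simp; omega)]
              rw [List.getElem_append_right (by simp; omega)]
              simp
            rw [hrhs]
            apply String.ext
            simp only [String.toList_ofList, String.toList_append]
            have hr0 : ¬ ((i : Int) = 0) := by omega
            have hr1 : ¬ ((i : Int) = num - 1) := by omega
            apply List.ext_getElem
            · simp; omega
            · intro c hc1 hc2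
              have hcn : c < n := by simpa using hc1
              simp only [List.getElem_map, List.getElem_range]
              rcases eq_or_ne c 0 with hc0 | hc0
              · subst hc0
                simp [hr1]
              · rcases eq_or_ne c (n - 1) with hcl | hcl
                · have hv : (c : Int) = num - 1 := by omega
                  obtain ⟨c', rfl⟩ : ∃ c', c = c' + 1 := ⟨c - 1, by omega⟩
                  simp only [hr1, hv, or_true, if_pos]
                  rw [List.getElem_append_right (by simp; omega)]
                  simp
                · have hne0 : ¬ ((c : Int) = 0) := by omega
                  have hne1 : ¬ ((c : Int) = num - 1) := by omega
                  obtain ⟨c', rfl⟩ : ∃ c', c = c' + 1 := ⟨c - 1, by omega⟩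
                  simp only [hr0, hr1, hne0, hne1]
                  rw [List.getElem_append_left (by simp; omega)]
                  simp
          · -- last row
            have hil : i = n - 1 := by omega
            have hrhs : ([String.ofList (List.replicate n '#')] ++
                List.replicate (num - 2).toNat
                  ("#" ++ String.ofList (List.replicate (num - 2).toNat ' ') ++ "#") ++
                [String.ofList (List.replicate n '#')])[i]'(by simp; omega)
                = String.ofList (List.replicate n '#') := by
              rw [List.getElem_append_right (by simp; omega)]
              simp
            rw [hrhs]
            apply String.ext
            simp only [String.toList_ofList]
            have hr1 : ((i : Int) = num - 1) := by omega
            apply List.ext_getElem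
            · simp
            · intro c hc1 hc2
              simp [hr1]
        · -- first row
          have hiz : i = 0 := by omega
          subst hiz
          have hrhs : ([String.ofList (List.replicate n '#')] ++
              List.replicate (num - 2).toNat
                ("#" ++ String.ofList (List.replicate (num - 2).toNat ' ') ++ "#") ++
              [String.ofList (List.replicate n '#')])[0]'(by simp)
              = String.ofList (List.replicate n '#') := by
            rw [List.getElem_append_left (by simp)]
            simp
          rw [hrhs]
          apply String.ext
          simp only [String.toList_ofList]
          apply List.ext_getElem
          · simp
          · intro c hc1 hc2
            simp
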